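-- pv_equiv track=rewrite | github.com/SunPCSolutions/Compileo | src/compileo/features/datasetgen/version_manager.py | validate_version_string
-- ===== SOURCE A (Python) =====
-- def validate_version_string(version: str) -> bool:
--     """
--     Validates a semantic version string.
--
--     Args:
--         version: Version string to validate
--
--     Returns:
--         bool: True if valid
--     """
--     try:
--         parts = version.split('.')
--         if len(parts) != 3:
--             return False
--         return all(part.isdigit() and int(part) >= 0 for part in parts)
--     except:
--         return False
-- ===== SOURCE B (Python) =====
-- def validate_version_string(version: str) -> bool:
--     """Single forward scan: count dot-separated groups and require each group
--     to be a non-empty run of ASCII digits, without building a parts list."""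
--     dots = 0
--     group_len = 0
--     for ch in version:
--         if ch == '.':
--             if group_len == 0:
--                 return False
--             dots += 1
--             group_len = 0
--         elif '0' <= ch <= '9':
--             group_len += 1
--         else:
--             return False
--     return dots == 2 and group_len > 0
-- ===== Notes on version B (the rewrite author's own statement) =====
-- stated objective: alternative
-- what changed: Replaces splitting the string into a parts list followed by per-part isdigit/int validation with a single forward character scan that counts separators and the current digit-group length, never materialising the parts.
import Mathlib
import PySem

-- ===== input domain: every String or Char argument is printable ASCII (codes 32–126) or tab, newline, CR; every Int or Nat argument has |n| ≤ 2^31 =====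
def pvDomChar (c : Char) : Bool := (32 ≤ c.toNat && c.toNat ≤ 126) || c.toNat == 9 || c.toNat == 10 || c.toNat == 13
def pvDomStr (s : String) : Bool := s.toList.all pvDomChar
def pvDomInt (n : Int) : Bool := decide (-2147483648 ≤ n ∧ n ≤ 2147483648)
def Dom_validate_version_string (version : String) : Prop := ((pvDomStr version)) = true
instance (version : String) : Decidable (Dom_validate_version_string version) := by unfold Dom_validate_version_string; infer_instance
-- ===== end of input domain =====

-- B replaces A's split-into-parts-then-validate-each with a single forward scan over the
-- characters that counts dots and the current group length (objective: alternative).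

-- ===== PORT A =====
-- int(part): exact port of Python int() on digit-only strings — the only strings it is
-- applied to, since Python short-circuits `part.isdigit() and int(part) >= 0`
def pvIntOfDigits (p : List Char) : Int :=
  p.foldl (fun acc c => acc * 10 + ((c.toNat - '0'.toNat : Nat) : Int)) 0

-- part.isdigit() and int(part) >= 0   (one element of A's all(...) generator)
def pvOkA (p : List Char) : Bool :=
  PySem.Chars.strIsdigit p && decide (0 ≤ pvIntOfDigits p)

def validate_version_string (version : String) : Bool :=
  -- parts = version.split('.')  (sep '.' is non-empty, so splitOn is the exact form)
  let parts := PySem.Chars.splitOn version.toList ['.']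
  if parts.length ≠ 3 then false
  else parts.all pvOkA

-- ===== PORT B =====
-- the for-loop of Source B: state = (dots, group_len); early `return False` = the `false` branches
def pvScan : List Char → Nat → Nat → Bool
  | [], dots, glen => dots == 2 && decide (0 < glen)
  | c :: rest, dots, glen =>
    if c = '.' then
      if glen = 0 then false else pvScan rest (dots + 1) 0
    else if '0' ≤ c ∧ c ≤ '9' then pvScan rest dots (glen + 1)
    else false

def validate_version_string_alt (version : String) : Bool :=
  pvScan version.toList 0 0

-- ===== PRECONDITION & SPEC =====
def Spec_validate_version_string (version : String) (out : Bool) : Prop := out = validate_version_string_alt version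
instance (version : String) (out : Bool) : Decidable (Spec_validate_version_string version out) := by unfold Spec_validate_version_string; infer_instance

-- ===== CLAIM (what is proved, stated in full; the proofs are below) =====
def Claim_equal_validate_version_string : Prop := ∀ (version : String), Dom_validate_version_string version → Spec_validate_version_string version (validate_version_string version)

-- ===== LEMMAS AND PROOFS =====

-- functional spec of splitOn on the single-character separator '.':
-- pvSplit1 cur l = the parts of (cur.reverse ++ l), cur being the (reversed) current group
def pvSplit1 : List Char → List Char → List (List Char)
  | cur, [] => [cur.reverse]
  | cur, c :: r => if c = '.' then cur.reverse :: pvSplit1 [] r else pvSplit1 (c :: cur) r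

lemma pvIntOfDigits_aux_nonneg (p : List Char) :
    ∀ acc : Int, 0 ≤ acc → 0 ≤ p.foldl (fun acc c => acc * 10 + ((c.toNat - '0'.toNat : Nat) : Int)) acc := by
  induction p with
  | nil => intro acc h; simpa using h
  | cons c r ih =>
    intro acc h
    simp only [List.foldl_cons]
    exact ih _ (by positivity)

lemma pvIntOfDigits_nonneg (p : List Char) : 0 ≤ pvIntOfDigits p :=
  pvIntOfDigits_aux_nonneg p 0 le_rfl

lemma pvOkA_eq (p : List Char) : pvOkA p = PySem.Chars.strIsdigit p := by
  simp [pvOkA, pvIntOfDigits_nonneg]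

lemma splitOn_go_eq : ∀ (fuel : Nat) (l cur acc : List _), l.length < fuel →
    PySem.Chars.splitOn.go ['.'] fuel l cur acc = acc.reverse ++ pvSplit1 cur l := by
  intro fuel
  induction fuel with
  | zero => intro l cur acc h; omega
  | succ f ih =>
    intro l cur acc h
    cases l with
    | nil => simp [PySem.Chars.splitOn.go, pvSplit1]
    | cons c rest =>
      by_cases hc : c = '.'
      · subst hc
        rw [show PySem.Chars.splitOn.go ['.'] (f+1) ('.' :: rest) cur acc
              = PySem.Chars.splitOn.go ['.'] f rest [] (cur.reverse :: acc) by
            simp [PySem.Chars.splitOn.go, List.isPrefixOf]]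
        rw [ih rest [] (cur.reverse :: acc) (by simp at h ⊢; omega)]
        simp [pvSplit1]
      · rw [show PySem.Chars.splitOn.go ['.'] (f+1) (c :: rest) cur acc
              = PySem.Chars.splitOn.go ['.'] f rest (c :: cur) acc by
            simp only [PySem.Chars.splitOn.go, List.isPrefixOf, Bool.and_eq_true, beq_iff_eq]
            rw [if_neg (by simp [Ne.symm hc])]]
        rw [ih rest (c :: cur) acc (by simp at h ⊢; omega)]
        simp [pvSplit1, hc]

lemma splitOn_eq (cs : List Char) :
    PySem.Chars.splitOn cs ['.'] = pvSplit1 [] cs := by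
  rw [PySem.Chars.splitOn]
  rw [splitOn_go_eq (cs.length + 1) cs [] [] (by omega)]
  simp

lemma all_false_of_bad (l cur : List Char) (hbad : ∃ c ∈ cur, PySem.Chars.isdigit c = false) :
    (pvSplit1 cur l).all PySem.Chars.strIsdigit = false := by
  induction l generalizing cur with
  | nil =>
    obtain ⟨d, hd, hdd⟩ := hbad
    have hhead : PySem.Chars.strIsdigit cur.reverse = false := by
      simp only [PySem.Chars.strIsdigit, List.all_reverse, Bool.and_eq_false_iff]
      exact Or.inr (List.all_eq_false.mpr ⟨d, hd, by simp [hdd]⟩)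
    simp [pvSplit1, hhead]
  | cons c r ih =>
    by_cases hc : c = '.'
    · subst hc
      obtain ⟨d, hd, hdd⟩ := hbad
      have hhead : PySem.Chars.strIsdigit cur.reverse = false := by
        simp only [PySem.Chars.strIsdigit, List.all_reverse, Bool.and_eq_false_iff]
        exact Or.inr (List.all_eq_false.mpr ⟨d, hd, by simp [hdd]⟩)
      simp [pvSplit1, hhead]
    · simp only [pvSplit1, if_neg hc]
      exact ih (c :: cur) (by obtain ⟨d, hd, hdd⟩ := hbad; exact ⟨d, List.mem_cons_of_mem _ hd, hdd⟩)

lemma scan_eq : ∀ (l cur : List Char) (dots : Nat), (∀ c ∈ cur, PySem.Chars.isdigit c = true) →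
    pvScan l dots cur.length
      = (decide ((pvSplit1 cur l).length + dots = 3) && (pvSplit1 cur l).all PySem.Chars.strIsdigit) := by
  intro l
  induction l with
  | nil =>
    intro cur dots hcur
    simp only [pvScan, pvSplit1, List.all_cons, List.all_nil, Bool.and_true, List.length_cons,
      List.length_nil]
    cases cur with
    | nil => simp [PySem.Chars.strIsdigit]
    | cons c r =>
      have hdig : PySem.Chars.strIsdigit (c :: r).reverse = true := by
        simp only [PySem.Chars.strIsdigit, List.all_reverse, Bool.and_eq_true]
        exact ⟨by simp, List.all_eq_true.mpr hcur⟩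
      simp only [hdig, Bool.and_true, List.length_cons]
      by_cases hdots : dots = 2
      · simp [hdots]
      · have h3 : ¬(0 + 1 + dots = 3) := by omega
        simp [hdots, h3]
  | cons c r ih =>
    intro cur dots hcur
    by_cases hc : c = '.'
    · subst hc
      by_cases hcur0 : cur = []
      · subst hcur0
        simp [pvScan, pvSplit1, PySem.Chars.strIsdigit]
      · have hlen : cur.length ≠ 0 := by simpa [List.length_eq_zero_iff] using hcur0
        rw [show pvScan ('.' :: r) dots cur.length = pvScan r (dots + 1) 0 by
          simp [pvScan, hlen]]
        rw [show (0 : Nat) = List.length ([] : List Char) by rfl]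
        rw [ih [] (dots + 1) (by simp)]
        have hdig : PySem.Chars.strIsdigit cur.reverse = true := by
          simp only [PySem.Chars.strIsdigit, List.all_reverse, Bool.and_eq_true]
          exact ⟨by simpa using hcur0, List.all_eq_true.mpr hcur⟩
        rw [show pvSplit1 cur ('.' :: r) = cur.reverse :: pvSplit1 [] r from by simp [pvSplit1]]
        simp only [List.length_cons, List.all_cons, hdig, Bool.true_and]
        congr 1
        simp only [decide_eq_decide]
        omega
    · by_cases hd : '0' ≤ c ∧ c ≤ '9'
      · rw [show pvScan (c :: r) dots cur.length = pvScan r dots (cur.length + 1) by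
          simp only [pvScan, if_neg hc]
          rw [if_pos hd]]
        rw [show cur.length + 1 = (c :: cur).length by rfl]
        rw [ih (c :: cur) dots (by
          intro d hdm
          rcases List.mem_cons.mp hdm with h | h
          · subst h; simp [PySem.Chars.isdigit, hd.1, hd.2]
          · exact hcur d h)]
        simp [pvSplit1, hc]
      · rw [show pvScan (c :: r) dots cur.length = false by
          simp only [pvScan, if_neg hc]
          rw [if_neg hd]]
        have hdF : PySem.Chars.isdigit c = false := by
          simp only [PySem.Chars.isdigit, Bool.and_eq_false_iff, decide_eq_false_iff_not]
          by_cases h1 : '0' ≤ c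
          · exact Or.inr (fun h2 => hd ⟨h1, h2⟩)
          · exact Or.inl h1
        rw [show pvSplit1 cur (c :: r) = pvSplit1 (c :: cur) r by simp [pvSplit1, hc]]
        rw [all_false_of_bad r (c :: cur) ⟨c, List.mem_cons_self, hdF⟩]
        simp

lemma all_pvOkA_eq (parts : List (List Char)) :
    parts.all pvOkA = parts.all PySem.Chars.strIsdigit := by
  simp [show pvOkA = PySem.Chars.strIsdigit from funext pvOkA_eq]

-- ===== VERDICT (by name: the statement is the Claim_ definition above) =====
theorem validate_version_string_spec : Claim_equal_validate_version_string := by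
  intro version _
  unfold Spec_validate_version_string
  have hA : validate_version_string version
      = (if (pvSplit1 [] version.toList).length ≠ 3 then false
         else (pvSplit1 [] version.toList).all pvOkA) := by
    simp only [validate_version_string, splitOn_eq]
  rw [hA, all_pvOkA_eq]
  unfold validate_version_string_alt
  have hB : pvScan version.toList 0 0
      = (decide ((pvSplit1 [] version.toList).length + 0 = 3)
          && (pvSplit1 [] version.toList).all PySem.Chars.strIsdigit) := by
    simpa using scan_eq version.toList [] 0 (by simp)
  rw [hB]
  by_cases h3 : (pvSplit1 [] version.toList).length = 3 <;> simp [h3]
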